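-- pv_equiv track=rewrite | github.com/cansarigol/mailmap-checker | src/mailmap_checker/fixer.py | _has_group_separators
-- ===== SOURCE A (Python) =====
-- def _has_group_separators(lines: list[str]) -> bool:
--     saw_content = False
--     saw_blank_after_content = False
--     for line in lines:
--         stripped = line.strip()
--         if not stripped:
--             if saw_content:
--                 saw_blank_after_content = True
--             continue
--         if stripped.startswith("#"):
--             continue
--         if saw_blank_after_content:
--             return True
--         saw_content = True
--     return False
-- ===== SOURCE B (Python) =====
-- def _has_group_separators(lines: list[str]) -> bool:
--     content = [
--         i
--         for i, line in enumerate(lines)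
--         if line.strip() and not line.strip().startswith("#")
--     ]
--     if not content:
--         return False
--     return any(not line.strip() for line in lines[content[0] + 1 : content[-1]])
-- ===== Notes on version B (the rewrite author's own statement) =====
-- stated objective: alternative
-- what changed: Replaces A's single-pass two-flag state machine with an index-collection pass (list of content-line indices) followed by a blank scan over the slice strictly between the first and last content line.
import Mathlib
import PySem

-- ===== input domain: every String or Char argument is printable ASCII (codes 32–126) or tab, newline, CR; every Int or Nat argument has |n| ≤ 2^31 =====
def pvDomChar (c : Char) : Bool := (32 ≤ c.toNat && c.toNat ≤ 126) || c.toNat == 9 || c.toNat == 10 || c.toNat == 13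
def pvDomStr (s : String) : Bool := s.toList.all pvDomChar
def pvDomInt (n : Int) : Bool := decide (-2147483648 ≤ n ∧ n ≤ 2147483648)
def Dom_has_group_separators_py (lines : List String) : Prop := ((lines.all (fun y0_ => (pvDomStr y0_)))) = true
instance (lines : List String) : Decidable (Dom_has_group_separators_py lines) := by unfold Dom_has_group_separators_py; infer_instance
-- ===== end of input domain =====

-- B replaces A's two-flag state machine by collecting content-line indices and scanning
-- the slice strictly between the first and last content line for a blank (objective: alternative).

-- ===== PORT A =====
-- loop with early return, ported as structural recursion over (saw_content, saw_blank_after_content)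
def goA : List String → Bool → Bool → Bool
  | [], _, _ => false
  | line :: rest, sawC, sawB =>
    let stripped := PySem.Str.strip line
    if stripped == "" then goA rest sawC (if sawC then true else sawB)
    else if PySem.Str.startswith stripped "#" then goA rest sawC sawB
    else if sawB then true
    else goA rest true sawB

def has_group_separators_py (lines : List String) : Bool := goA lines false false

-- ===== PORT B =====
def has_group_separators_py_alt (lines : List String) : Bool :=
  let content := ((PySem.List.enumerate lines).filter
      (fun p => !(PySem.Str.strip p.2 == "") && !(PySem.Str.startswith (PySem.Str.strip p.2) "#"))).map
      (fun p => p.1)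
  match content with
  | [] => false
  | f :: rest =>
    -- content[-1] on a nonempty list is its last element (exact)
    (PySem.List.slice lines (some (f + 1)) (some ((f :: rest).getLast (List.cons_ne_nil _ _)))).any
      (fun line => PySem.Str.strip line == "")

-- ===== PRECONDITION & SPEC =====
def Spec_has_group_separators_py (lines : List String) (out : Bool) : Prop := out = has_group_separators_py_alt lines
instance (lines : List String) (out : Bool) : Decidable (Spec_has_group_separators_py lines out) := by unfold Spec_has_group_separators_py; infer_instance

-- ===== CLAIM (what is proved, stated in full; the proofs are below) =====
def Claim_equal_has_group_separators_py : Prop := ∀ (lines : List String), Dom_has_group_separators_py lines → Spec_has_group_separators_py lines (has_group_separators_py lines)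

-- ===== LEMMAS AND PROOFS =====

-- line classification (proof-side names for the two tests both programs make)
def blankL (s : String) : Bool := PySem.Str.strip s == ""
def contL (s : String) : Bool := !(PySem.Str.strip s == "") && !(PySem.Str.startswith (PySem.Str.strip s) "#")

-- "a blank line occurs strictly before some content line"
def BCf : List String → Bool
  | [] => false
  | x :: r => (blankL x && r.any contL) || BCf r

-- "content, then blank, then content"
def CBCf : List String → Bool
  | [] => false
  | x :: r => (contL x && BCf r) || CBCf r

-- Nat-valued content-index list (proof-side mirror of B's comprehension)
def idxC : List String → List Nat
  | [] => []
  | x :: r => if contL x then 0 :: (idxC r).map (· + 1) else (idxC r).map (· + 1)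

theorem goA_eq (l : List String) : ∀ sc sb : Bool,
    goA l sc sb = ((sb && l.any contL) || (sc && BCf l) || CBCf l) := by
  induction l with
  | nil => intro sc sb; simp [goA, BCf, CBCf]
  | cons x r ih =>
    intro sc sb
    by_cases hb : PySem.Str.strip x = ""
    · simp [goA, hb, BCf, CBCf, ih, contL, blankL]
      cases sb <;> cases sc <;> simp [Bool.and_or_distrib_left]
    · cases hh : PySem.Chars.startswith (PySem.Chars.strip x.toList) ['#'] with
      | true =>
        have hb' : (PySem.Str.strip x == "") = false := by simp [hb]
        simp [goA, hb', hh, BCf, CBCf, ih, contL, blankL]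
      | false =>
        have hc : contL x = true := by simp [contL, hb, hh]
        cases sb with
        | true => simp [goA, hb, hh, List.any_cons, hc]
        | false =>
          simp [goA, hb, hh, ih, BCf, CBCf, hc, blankL, List.any_cons]
          cases sc <;> simp <;> tauto

theorem BCf_cons_of_true (x : String) (r : List String) (h : BCf r = true) :
    BCf (x :: r) = true := by simp [BCf, h]

theorem CBC_imp_BC (l : List String) (h : CBCf l = true) : BCf l = true := by
  induction l with
  | nil => simp [CBCf] at h
  | cons x r ih =>
    simp [CBCf] at h
    rcases h with ⟨_, h⟩ | h
    · exact BCf_cons_of_true _ _ h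
    · exact BCf_cons_of_true _ _ (ih h)

theorem BCf_no_content (l : List String) (h : l.any contL = false) : BCf l = false := by
  induction l with
  | nil => simp [BCf]
  | cons x r ih =>
    simp only [List.any_cons, Bool.or_eq_false_iff] at h
    simp [BCf, h.2, ih h.2]

theorem CBCf_no_content (l : List String) (h : l.any contL = false) : CBCf l = false := by
  induction l with
  | nil => simp [CBCf]
  | cons x r ih =>
    simp only [List.any_cons, Bool.or_eq_false_iff] at h
    simp [CBCf, h.1, ih h.2]

theorem idxC_append (s : List String) (y : String) :
    idxC (s ++ [y]) = idxC s ++ (if contL y then [s.length] else []) := by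
  induction s with
  | nil => cases hy : contL y <;> simp [idxC, hy]
  | cons x r ih =>
    simp only [List.cons_append, idxC, ih]
    split <;> simp [List.map_append] <;> split <;> simp

theorem idxC_lt_length (l : List String) : ∀ k ∈ idxC l, k < l.length := by
  induction l with
  | nil => simp [idxC]
  | cons x r ih =>
    intro k hk
    simp only [idxC] at hk
    split at hk <;> simp only [List.mem_cons, List.mem_map] at hk
    · rcases hk with rfl | ⟨a, ha, rfl⟩
      · simp
      · have := ih a ha; simp; omega
    · rcases hk with ⟨a, ha, rfl⟩
      have := ih a ha; simp; omega

theorem idxC_nil_iff (l : List String) : idxC l = [] ↔ l.any contL = false := by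
  induction l with
  | nil => simp [idxC]
  | cons x r ih =>
    simp only [idxC, List.any_cons]
    split
    · rename_i h; simp [h]
    · rename_i h; simp only [Bool.not_eq_true] at h
      simp [h, List.map_eq_nil_iff, ih]

-- BCf l scans exactly the prefix strictly before the last content line
theorem BCf_append_content (s : List String) (y : String) (hy : contL y = true) :
    BCf (s ++ [y]) = s.any blankL := by
  induction s with
  | nil => simp [BCf]
  | cons x r ih =>
    simp only [List.cons_append, BCf, ih, List.any_cons, List.any_append]
    simp [hy]

theorem BCf_append_non_content (s : List String) (y : String) (hy : contL y = false) :
    BCf (s ++ [y]) = BCf s := by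
  induction s with
  | nil => simp [BCf, List.any_nil]
  | cons x r ih =>
    simp only [List.cons_append, BCf, ih, List.any_append, List.any_cons, List.any_nil, hy]
    simp

theorem BCf_eq_take_last (l : List String) (h : idxC l ≠ []) :
    BCf l = (l.take ((idxC l).getLast h)).any blankL := by
  induction l using List.reverseRecOn with
  | nil => simp [idxC] at h
  | append_singleton s y ih =>
    by_cases hy : contL y = true
    · have hidx : idxC (s ++ [y]) = idxC s ++ [s.length] := by simp [idxC_append, hy]
      have hlast : (idxC (s ++ [y])).getLast h = s.length := by
        simp [hidx]
      rw [hlast, BCf_append_content s y hy]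
      simp [List.take_append_of_le_length (le_refl s.length)]
    · have hy' : contL y = false := by simpa using hy
      have hidx : idxC (s ++ [y]) = idxC s := by simp [idxC_append, hy']
      have hs : idxC s ≠ [] := by rw [hidx] at h; exact h
      have hlast : (idxC (s ++ [y])).getLast h = (idxC s).getLast hs := by
        simp only [hidx]
      have hlt : (idxC s).getLast hs < s.length := idxC_lt_length s _ (List.getLast_mem hs)
      rw [hlast, BCf_append_non_content s y hy', ih hs]
      rw [List.take_append_of_le_length (by omega)]

-- B's comprehension computes the Int casts of idxC
theorem enum_filter_eq (l : List String) : ∀ s : Int,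
    ((PySem.List.enumerate l s).filter (fun p => contL p.2)).map (fun p => p.1)
      = List.map (fun k : Nat => s + (k : Int)) (idxC l) := by
  induction l with
  | nil => intro s; simp [PySem.List.enumerate_nil, idxC]
  | cons x r ih =>
    intro s
    rw [PySem.List.enumerate_cons]
    cases hc : contL x
    · rw [List.filter_cons_of_neg (by simp [hc])]
      rw [ih (s+1)]
      simp only [idxC, hc, Bool.false_eq_true, if_false, List.map_map]
      exact List.map_congr_left (fun a _ => by simp; ring)
    · rw [List.filter_cons_of_pos (by simp [hc])]
      simp only [List.map_cons, idxC, hc, if_true, ih (s+1), List.map_map, List.cons.injEq]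
      refine ⟨by simp, List.map_congr_left (fun a _ => by simp; ring)⟩

-- B's port, with the comprehension replaced by idxC
theorem alt_eq (l : List String) : has_group_separators_py_alt l =
    (match List.map (fun k : Nat => (0:Int) + (k : Int)) (idxC l) with
     | [] => false
     | f :: rest =>
       (PySem.List.slice l (some (f + 1)) (some ((f :: rest).getLast (List.cons_ne_nil _ _)))).any
         (fun line => PySem.Str.strip line == "")) := by
  unfold has_group_separators_py_alt
  rw [show (fun p : Int × String => !(PySem.Str.strip p.2 == "") && !(PySem.Str.startswith (PySem.Str.strip p.2) "#"))
        = (fun p : Int × String => contL p.2) from rfl]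
  rw [enum_filter_eq l 0]

-- the interval form of CBCf: a blank strictly between the first and the last content index
theorem CBCf_take_drop (l : List String) (h : idxC l ≠ []) :
    CBCf l = ((l.drop ((idxC l).head h + 1)).take ((idxC l).getLast h - ((idxC l).head h + 1))).any blankL := by
  induction l with
  | nil => simp [idxC] at h
  | cons x r ih =>
    cases hc : contL x
    · have hidx : idxC (x :: r) = (idxC r).map (· + 1) := by simp [idxC, hc]
      have hr : idxC r ≠ [] := by
        intro hn; rw [hidx, hn] at h; simp at h
      cases hr' : idxC r with
      | nil => exact absurd hr' hr
      | cons hr0 tr =>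
        have hhead : (idxC (x :: r)).head h = hr0 + 1 := by simp [hidx, hr']
        have hmapne : (idxC r).map (· + 1) ≠ [] := by simp [hr']
        have hlast : (idxC (x :: r)).getLast h = (idxC r).getLast hr + 1 := by
          rw [List.getLast_congr h hmapne hidx, List.getLast_map]
        rw [hhead, hlast]
        have hcbc : CBCf (x :: r) = CBCf r := by simp [CBCf, hc]
        rw [hcbc, ih hr]
        have hheadr : (idxC r).head hr = hr0 := by simp [hr']
        rw [hheadr]
        simp only [List.drop_succ_cons]
        congr 2
        omega
    · have hidx : idxC (x :: r) = 0 :: (idxC r).map (· + 1) := by simp [idxC, hc]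
      have hhead : (idxC (x :: r)).head h = 0 := by simp [hidx]
      rw [hhead]
      cases hr' : idxC r with
      | nil =>
        have hlast : (idxC (x :: r)).getLast h = 0 := by
          rw [List.getLast_congr h (by simp) hidx]; simp [hr']
        have hnc : r.any contL = false := (idxC_nil_iff r).mp hr'
        rw [hlast]
        simp [CBCf, BCf_no_content r hnc, CBCf_no_content r hnc]
      | cons hr0 tr =>
        have hr : idxC r ≠ [] := by rw [hr']; simp
        have hlast : (idxC (x :: r)).getLast h = (idxC r).getLast hr + 1 := by
          rw [List.getLast_congr h (by simp) hidx]
          rw [List.getLast_cons (by rw [hr']; simp), List.getLast_map]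
        rw [hlast]
        simp only [List.drop_succ_cons, List.drop_zero, Nat.add_sub_cancel]
        rw [← BCf_eq_take_last r hr]
        cases hcb : CBCf r
        · simp [CBCf, hc, hcb]
        · simp [CBCf, hc, hcb, CBC_imp_BC r hcb]

theorem alt_eq_CBCf (l : List String) : has_group_separators_py_alt l = CBCf l := by
  rw [alt_eq]
  cases hidx : idxC l with
  | nil => exact (CBCf_no_content l ((idxC_nil_iff l).mp hidx)).symm
  | cons h0 t =>
    have hne : idxC l ≠ [] := by rw [hidx]; simp
    simp only [List.map_cons]
    have hlastmap : (((0:Int) + (h0:Int)) :: List.map (fun k : Nat => (0:Int) + (k : Int)) t).getLast (List.cons_ne_nil _ _)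
        = (0:Int) + (((h0 :: t).getLast (List.cons_ne_nil _ _) : Nat) : Int) := by
      rw [List.getLast_congr (List.cons_ne_nil _ _) (by simp)
            (show ((0:Int) + (h0:Int)) :: List.map (fun k : Nat => (0:Int) + (k : Int)) t
              = List.map (fun k : Nat => (0:Int) + (k : Int)) (h0 :: t) from rfl)]
      rw [List.getLast_map]
    rw [hlastmap]
    have h1 : (0:Int) + (h0:Int) + 1 = ((h0 + 1 : Nat) : Int) := by push_cast; ring
    have h2 : (0:Int) + (((h0 :: t).getLast (List.cons_ne_nil _ _) : Nat) : Int)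
        = (((h0 :: t).getLast (List.cons_ne_nil _ _) : Nat) : Int) := by ring
    rw [h1, h2, PySem.List.slice_natCast]
    rw [CBCf_take_drop l hne]
    have hh : (idxC l).head hne = h0 := by simp [hidx]
    have hl : (idxC l).getLast hne = (h0 :: t).getLast (List.cons_ne_nil _ _) := List.getLast_congr _ _ hidx
    rw [hh, hl]
    rfl

-- ===== VERDICT (by name: the statement is the Claim_ definition above) =====
theorem has_group_separators_py_spec : Claim_equal_has_group_separators_py := by
  intro lines _
  unfold Spec_has_group_separators_py
  rw [alt_eq_CBCf, has_group_separators_py, goA_eq]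
  simp
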